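-- pv_equiv track=rewrite | github.com/LedgerInvesting/stapes | stapes/data/data.py | _build_core_index
-- ===== SOURCE A (Python) =====
-- def _build_core_index(raw_index, offsets):
--     core_index = []
--     for tri_id, exp_id, dev_id in raw_index:
--         all_offsets_present = True
--         for exp_offset, dev_offset in offsets:
--             offset_coord = (tri_id, exp_id - exp_offset, dev_id - dev_offset)
--             if offset_coord not in raw_index:
--                 all_offsets_present = False
--         if all_offsets_present:
--             core_index.append((tri_id, exp_id, dev_id))
--     return core_index
-- ===== SOURCE B (Python) =====
-- def _build_core_index(raw_index, offsets):
--     allowed = set(raw_index)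
--     for exp_offset, dev_offset in offsets:
--         shifted = {(t, e + exp_offset, d + dev_offset) for t, e, d in raw_index}
--         allowed &= shifted
--     return [(t, e, d) for t, e, d in raw_index if (t, e, d) in allowed]
-- ===== Notes on version B (the rewrite author's own statement) =====
-- stated objective: faster
-- what changed: Replaces the quadratic per-coordinate per-offset list scans by one hash set of the coordinates intersected with one shifted set per offset, then a single order-preserving membership filter.
import Mathlib
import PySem

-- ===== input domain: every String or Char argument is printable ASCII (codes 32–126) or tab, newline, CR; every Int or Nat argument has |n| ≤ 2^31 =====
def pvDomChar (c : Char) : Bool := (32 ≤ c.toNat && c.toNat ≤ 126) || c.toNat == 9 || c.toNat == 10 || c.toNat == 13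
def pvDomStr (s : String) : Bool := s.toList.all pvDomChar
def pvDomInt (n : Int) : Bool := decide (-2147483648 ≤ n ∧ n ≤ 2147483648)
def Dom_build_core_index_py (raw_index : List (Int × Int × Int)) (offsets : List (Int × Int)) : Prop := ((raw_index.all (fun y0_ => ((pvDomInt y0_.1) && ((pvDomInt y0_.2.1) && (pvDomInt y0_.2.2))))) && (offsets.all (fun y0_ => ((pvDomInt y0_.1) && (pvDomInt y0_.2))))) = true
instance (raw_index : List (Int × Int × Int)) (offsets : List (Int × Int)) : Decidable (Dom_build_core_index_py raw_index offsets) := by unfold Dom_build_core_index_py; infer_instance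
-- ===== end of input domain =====

-- B replaces A's per-coordinate list scans by one set of the coordinates intersected
-- with one shifted set per offset, then a single order-preserving membership filter (faster).

-- ===== PORT A =====
def build_core_index_py (raw_index : List (Int × Int × Int)) (offsets : List (Int × Int)) : List (Int × Int × Int) :=
  raw_index.foldl (fun core_index c =>
    let all_offsets_present := offsets.foldl (fun b o =>
      if (c.1, c.2.1 - o.1, c.2.2 - o.2) ∈ raw_index then b else false) true
    if all_offsets_present then core_index ++ [c] else core_index) []

-- ===== PORT B =====
def build_core_index_py_alt (raw_index : List (Int × Int × Int)) (offsets : List (Int × Int)) : List (Int × Int × Int) :=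
  let allowed : PySem.Set (Int × Int × Int) := offsets.foldl (fun allowed o =>
    PySem.Set.inter allowed
      (PySem.Set.ofList (raw_index.map (fun c => (c.1, c.2.1 + o.1, c.2.2 + o.2)))))
    (PySem.Set.ofList raw_index)
  raw_index.filter (fun c => PySem.Set.contains allowed c)

-- ===== PRECONDITION & SPEC =====
def Spec_build_core_index_py (raw_index : List (Int × Int × Int)) (offsets : List (Int × Int)) (out : List (Int × Int × Int)) : Prop := out = build_core_index_py_alt raw_index offsets
instance (raw_index : List (Int × Int × Int)) (offsets : List (Int × Int)) (out : List (Int × Int × Int)) : Decidable (Spec_build_core_index_py raw_index offsets out) := by unfold Spec_build_core_index_py; infer_instance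

-- ===== CLAIM =====
def Claim_equal_build_core_index_py : Prop := ∀ (raw_index : List (Int × Int × Int)) (offsets : List (Int × Int)), Dom_build_core_index_py raw_index offsets → Spec_build_core_index_py raw_index offsets (build_core_index_py raw_index offsets)

-- ===== LEMMAS AND PROOFS =====

-- A's inner flag loop is the conjunction over offsets
theorem flag_foldl {α : Type} (l : List α) (P : α → Prop) [DecidablePred P] (b : Bool) :
    l.foldl (fun b o => if P o then b else false) b = (b && l.all (fun o => decide (P o))) := by
  induction l generalizing b with
  | nil => simp
  | cons o l ih =>
    simp only [List.foldl_cons, List.all_cons, ih]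
    by_cases h : P o <;> simp [h]

-- A's outer append-if loop is a filter
theorem append_if_foldl {α : Type} (l : List α) (p : α → Bool) (acc : List α) :
    l.foldl (fun acc c => if p c then acc ++ [c] else acc) acc = acc ++ l.filter p := by
  induction l generalizing acc with
  | nil => simp
  | cons c l ih =>
    simp only [List.foldl_cons, List.filter_cons]
    by_cases h : p c <;> simp [h, ih]

-- membership in B's intersected set
theorem mem_allowed (raw : List (Int × Int × Int)) (offs : List (Int × Int))
    (s : PySem.Set (Int × Int × Int)) (x : Int × Int × Int) :
    x ∈ offs.foldl (fun allowed o =>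
        PySem.Set.inter allowed
          (PySem.Set.ofList (raw.map (fun c => (c.1, c.2.1 + o.1, c.2.2 + o.2))))) s ↔
      x ∈ s ∧ ∀ o ∈ offs, (x.1, x.2.1 - o.1, x.2.2 - o.2) ∈ raw := by
  induction offs generalizing s with
  | nil => simp
  | cons o offs ih =>
    simp only [List.foldl_cons, ih, PySem.Set.mem_inter, PySem.Set.mem_ofList, List.mem_map,
      List.forall_mem_cons]
    constructor
    · rintro ⟨⟨hs, c, hc, hcx⟩, hrest⟩
      refine ⟨hs, ?_, hrest⟩
      obtain ⟨c1, c2, c3⟩ := c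
      obtain ⟨x1, x2, x3⟩ := x
      simp_all
      obtain ⟨h1, h2, h3⟩ := hcx
      simpa [show x2 - o.1 = c2 from by omega, show x3 - o.2 = c3 from by omega] using hc
    · rintro ⟨hs, ho, hrest⟩
      refine ⟨⟨hs, ⟨x.1, x.2.1 - o.1, x.2.2 - o.2⟩, ho, ?_⟩, hrest⟩
      obtain ⟨x1, x2, x3⟩ := x
      simp

-- ===== VERDICT =====
theorem build_core_index_py_spec : Claim_equal_build_core_index_py := by
  intro raw_index offsets _
  unfold Spec_build_core_index_py build_core_index_py build_core_index_py_alt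
  simp only [flag_foldl, Bool.true_and, append_if_foldl, List.nil_append]
  refine List.filter_congr fun c hc => ?_
  refine Bool.eq_iff_iff.mpr ?_
  simp only [List.all_eq_true, decide_eq_true_eq, PySem.Set.contains_iff,
    mem_allowed, PySem.Set.mem_ofList]
  exact ⟨fun h => ⟨hc, h⟩, fun h => h.2⟩
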